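-- pv_equiv track=rewrite | github.com/s29602-pj/MetaheurstykaNonogram | Cel.py | porownaj_bloki
-- ===== SOURCE A (Python) =====
-- def porownaj_bloki(aktualne, wzorzec):
--     max_len = max(len(aktualne), len(wzorzec))
--     bledy = 0
--     for i in range(max_len):
--         a = aktualne[i] if i < len(aktualne) else 0
--         b = wzorzec[i] if i < len(wzorzec) else 0
--         if a != b:
--             bledy += 1
--     return bledy
-- ===== SOURCE B (Python) =====
-- def porownaj_bloki(aktualne, wzorzec):
--     # Count AGREEMENTS (equal pairs on the common prefix, plus zeros counted
--     # in the longer list's tail, where the shorter is conceptually zero-padded)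
--     # and subtract from the padded length: mismatches = max_len - agreements.
--     n, m = len(aktualne), len(wzorzec)
--     zgodne = sum(a == b for a, b in zip(aktualne, wzorzec))
--     zgodne += (aktualne if m <= n else wzorzec)[min(n, m):].count(0)
--     return max(n, m) - zgodne
-- ===== Notes on version B (the rewrite author's own statement) =====
-- stated objective: alternative
-- what changed: B counts by complement: instead of scanning padded indices for mismatches, it counts AGREEMENTS (equal pairs over the zipped common prefix plus zeros counted with list.count in the longer list's tail) and returns max_len minus that count.
import Mathlib
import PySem

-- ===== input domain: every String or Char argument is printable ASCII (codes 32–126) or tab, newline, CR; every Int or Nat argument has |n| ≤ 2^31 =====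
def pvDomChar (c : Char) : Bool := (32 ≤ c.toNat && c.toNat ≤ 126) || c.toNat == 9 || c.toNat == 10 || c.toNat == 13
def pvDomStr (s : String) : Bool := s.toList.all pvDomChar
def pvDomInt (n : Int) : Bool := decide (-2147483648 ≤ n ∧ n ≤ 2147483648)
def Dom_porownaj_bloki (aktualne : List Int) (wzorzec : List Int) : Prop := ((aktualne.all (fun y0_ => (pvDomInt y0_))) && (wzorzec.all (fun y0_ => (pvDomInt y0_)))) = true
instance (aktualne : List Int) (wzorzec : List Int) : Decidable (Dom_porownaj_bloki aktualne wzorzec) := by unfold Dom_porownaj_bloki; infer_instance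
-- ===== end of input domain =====

-- B counts agreements (equal zipped pairs + zeros in the longer tail) and subtracts from the padded length (alternative complement-counting decomposition, same cost).


-- ===== PORT A =====
-- Port of A: one loop over range(max_len) with zero-padded conditional indexing, counting mismatches.
def porownaj_bloki (aktualne : List Int) (wzorzec : List Int) : Int :=
  (PySem.List.pyRange 0 (max (aktualne.length : Int) (wzorzec.length : Int)) 1).foldl
    (fun bledy i =>
      if ((if i < (aktualne.length : Int) then PySem.List.pyGetD aktualne i 0 else 0)
          != (if i < (wzorzec.length : Int) then PySem.List.pyGetD wzorzec i 0 else 0))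
      then bledy + 1 else bledy) 0

-- ===== PORT B =====
-- Port of B: count agreements (equal zipped pairs + zeros in the longer list's tail), return max_len - agreements.
def porownaj_bloki_alt (aktualne : List Int) (wzorzec : List Int) : Int :=
  let n := aktualne.length
  let m := wzorzec.length
  let zgodne : Nat :=
    (aktualne.zip wzorzec).countP (fun p => p.1 == p.2)
      + ((if m ≤ n then aktualne else wzorzec).drop (min n m)).count 0
  ((max n m : Nat) : Int) - (zgodne : Int)

-- ===== PRECONDITION & SPEC =====
def Spec_porownaj_bloki (aktualne : List Int) (wzorzec : List Int) (out : Int) : Prop := out = porownaj_bloki_alt aktualne wzorzec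
instance (aktualne : List Int) (wzorzec : List Int) (out : Int) : Decidable (Spec_porownaj_bloki aktualne wzorzec out) := by unfold Spec_porownaj_bloki; infer_instance

-- ===== CLAIM (what is proved, stated in full; the proofs are below) =====
def Claim_equal_porownaj_bloki : Prop := ∀ (aktualne : List Int) (wzorzec : List Int), Dom_porownaj_bloki aktualne wzorzec → Spec_porownaj_bloki aktualne wzorzec (porownaj_bloki aktualne wzorzec)

-- ===== LEMMAS AND PROOFS =====

-- tail pass, right side padded: counting k with 0 != wz[k] is counting nonzero elements
theorem countRange_zero_left (wz : List Int) :
    (List.range wz.length).countP (fun k => (0 : Int) != wz.getD k 0)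
      = wz.countP (fun x => x != 0) := by
  induction wz with
  | nil => rfl
  | cons b bs ih =>
    rw [List.length_cons, List.range_succ_eq_map, List.countP_cons]
    simp only [List.countP_map, Function.comp_def, List.getD_cons_succ, List.getD_cons_zero]
    rw [ih, List.countP_cons]
    have hb : ((0 : Int) != b) = (b != 0) := by simp [bne, eq_comm]
    rw [hb]

-- tail pass, left side padded
theorem countRange_zero_right (ak : List Int) :
    (List.range ak.length).countP (fun k => ak.getD k 0 != (0 : Int))
      = ak.countP (fun x => x != 0) := by
  induction ak with
  | nil => rfl
  | cons a as ih =>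
    rw [List.length_cons, List.range_succ_eq_map, List.countP_cons]
    simp only [List.countP_map, Function.comp_def, List.getD_cons_succ, List.getD_cons_zero]
    rw [ih, List.countP_cons]

-- the padded index count over range(max) equals prefix-mismatches plus tail-nonzeros
theorem countRange_eq_split (ak : List Int) : ∀ (wz : List Int),
    (List.range (max ak.length wz.length)).countP (fun k => ak.getD k 0 != wz.getD k 0)
      = (ak.zip wz).countP (fun p => p.1 != p.2)
        + ((ak.drop (min ak.length wz.length) ++ wz.drop (min ak.length wz.length)).countP
            (fun x => x != 0)) := by
  induction ak with
  | nil =>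
    intro wz
    simpa using countRange_zero_left wz
  | cons a as ih =>
    intro wz
    cases wz with
    | nil =>
      simpa using countRange_zero_right (a :: as)
    | cons b bs =>
      have h : max (a :: as).length (b :: bs).length = max as.length bs.length + 1 := by
        simp [Nat.succ_max_succ]
      rw [h, List.range_succ_eq_map]
      simp only [List.countP_cons, List.countP_map, Function.comp_def, List.getD_cons_succ,
        List.getD_cons_zero, List.zip_cons_cons, List.length_cons, Nat.succ_min_succ,
        List.drop_succ_cons]
      rw [ih bs]
      omega

-- A's pyRange fold is the padded index count over range(max)
theorem portA_eq_countRange (ak wz : List Int) :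
    porownaj_bloki ak wz
      = ((List.range (max ak.length wz.length)).countP
          (fun k => ak.getD k 0 != wz.getD k 0) : Nat) := by
  unfold porownaj_bloki
  rw [show (max (ak.length : Int) (wz.length : Int)) = ((max ak.length wz.length : Nat) : Int) by
        simp [Nat.cast_max],
    PySem.List.pyRange_zero_natCast, List.foldl_map,
    PySem.List.foldl_count_if (fun k : Nat =>
      (if (k : Int) < (ak.length : Int) then PySem.List.pyGetD ak (k : Int) 0 else 0)
        != (if (k : Int) < (wz.length : Int) then PySem.List.pyGetD wz (k : Int) 0 else 0))]
  rw [zero_add]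
  congr 1
  apply List.countP_congr
  intro k hk
  have hA : (if (k : Int) < (ak.length : Int) then PySem.List.pyGetD ak (k : Int) 0 else 0)
      = ak.getD k 0 := by
    by_cases h : k < ak.length
    · simp [h, PySem.List.pyGetD_natCast]
    · simp [h]
  have hB : (if (k : Int) < (wz.length : Int) then PySem.List.pyGetD wz (k : Int) 0 else 0)
      = wz.getD k 0 := by
    by_cases h : k < wz.length
    · simp [h, PySem.List.pyGetD_natCast]
    · simp [h]
  rw [hA, hB]

-- mismatch and match counts over the zipped prefix split its length
theorem countNE_add_countEQ (l : List (Int × Int)) :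
    l.countP (fun p => p.1 != p.2) + l.countP (fun p => p.1 == p.2) = l.length := by
  induction l with
  | nil => rfl
  | cons a as ih =>
    rw [List.countP_cons, List.countP_cons, List.length_cons]
    by_cases h : a.1 = a.2 <;> simp [h, bne] at ih ⊢ <;> omega

-- nonzero count and zero count split the length
theorem countNE_add_count0 (l : List Int) :
    l.countP (fun x => x != 0) + l.count 0 = l.length := by
  induction l with
  | nil => rfl
  | cons a as ih =>
    rw [List.countP_cons, List.count_cons, List.length_cons]
    by_cases h : a = 0 <;> simp [h] <;> omega

-- ===== VERDICT (by name: the statement is the Claim_ definition above) =====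
theorem porownaj_bloki_spec : Claim_equal_porownaj_bloki := by
  intro ak wz _
  unfold Spec_porownaj_bloki porownaj_bloki_alt
  rw [portA_eq_countRange, countRange_eq_split]
  have htail : ak.drop (min ak.length wz.length) ++ wz.drop (min ak.length wz.length)
      = (if wz.length ≤ ak.length then ak else wz).drop (min ak.length wz.length) := by
    by_cases h : wz.length ≤ ak.length
    · have he : wz.drop (min ak.length wz.length) = [] :=
        List.drop_eq_nil_of_le (by omega)
      simp [h, he]
    · have he : ak.drop (min ak.length wz.length) = [] :=
        List.drop_eq_nil_of_le (by omega)
      simp [h, he]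
  rw [htail]
  have h1 := countNE_add_countEQ (ak.zip wz)
  rw [List.length_zip] at h1
  have h2 := countNE_add_count0
      ((if wz.length ≤ ak.length then ak else wz).drop (min ak.length wz.length))
  have hlen : ((if wz.length ≤ ak.length then ak else wz).drop
      (min ak.length wz.length)).length = max ak.length wz.length - min ak.length wz.length := by
    by_cases h : wz.length ≤ ak.length <;> simp [h] <;> omega
  rw [hlen] at h2
  push_cast
  omega
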